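-- pv_equiv track=rewrite | github.com/singhal/AWT_delimit | calculate_dstat.py | get_sp_allele
-- ===== SOURCE A (Python) =====
-- def get_sp_allele(ids, var2):
-- 	alleles = []
-- 	for id in ids:
-- 		if id in var2:
-- 			alleles += var2[id]
-- 	alleles = [a for a in alleles if a != 'N']
--
-- 	allele = None
-- 	# needs to be rep'd by at least 2 chrs in each sp
-- 	if len(alleles) < 2:
-- 		allele = 'N'
-- 	# no polymorphic sites
-- 	elif len(set(alleles)) > 1:
-- 		allele = 'N'
-- 	else:
-- 		allele = alleles[0]
--
-- 	return(allele)
-- ===== SOURCE B (Python) =====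
-- def get_sp_allele(ids, var2):
--     count = 0
--     first = None
--     mismatch = False
--     for id in ids:
--         if id in var2:
--             for a in var2[id]:
--                 if a == 'N':
--                     continue
--                 if first is None:
--                     first = a
--                 else:
--                     mismatch = mismatch or (a != first)
--                 count += 1
--     if count >= 2 and not mismatch:
--         return first
--     return 'N'
-- ===== Notes on version B (the rewrite author's own statement) =====
-- stated objective: alternative
-- what changed: B replaces A's build-list / filter / set-materialisation pipeline with a single streaming pass keeping only a count, the first non-'N' allele and a mismatch flag, using O(1) extra space.
import Mathlib
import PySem

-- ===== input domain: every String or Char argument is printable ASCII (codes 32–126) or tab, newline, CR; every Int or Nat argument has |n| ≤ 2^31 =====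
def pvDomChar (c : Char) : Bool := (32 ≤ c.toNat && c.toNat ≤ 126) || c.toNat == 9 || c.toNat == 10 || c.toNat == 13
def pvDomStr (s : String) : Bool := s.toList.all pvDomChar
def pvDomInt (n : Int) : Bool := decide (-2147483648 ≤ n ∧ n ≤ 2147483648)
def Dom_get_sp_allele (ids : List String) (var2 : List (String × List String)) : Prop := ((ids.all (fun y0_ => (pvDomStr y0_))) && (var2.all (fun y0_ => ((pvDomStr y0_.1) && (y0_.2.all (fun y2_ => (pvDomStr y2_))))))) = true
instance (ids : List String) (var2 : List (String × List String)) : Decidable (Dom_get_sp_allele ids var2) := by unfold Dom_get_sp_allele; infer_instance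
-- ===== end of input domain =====

-- B is an alternative decomposition: a single streaming pass with O(1) state
-- (count, first non-'N' allele, mismatch flag) instead of A's materialised
-- allele list, filtered copy and set.

-- ===== PORT A =====
def get_sp_allele (ids : List String) (var2 : List (String × List String)) : String :=
  let alleles : List String := ids.foldl (fun acc id =>
    match (PySem.Dict.mk var2).get? id with
    | some v => acc ++ v
    | none => acc) []
  let alleles := alleles.filter (fun a => a != "N")
  if alleles.length < 2 then "N"
  else if (PySem.Set.ofList alleles).length > 1 then "N"
  -- index 0 is in range here: this branch has alleles.length ≥ 2
  else (PySem.List.pyGet? alleles 0).getD "N"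

-- ===== PORT B =====
def altStep (st : Int × Option String × Bool) (a : String) : Int × Option String × Bool :=
  if a == "N" then st
  else
    match st with
    | (c, none, m) => (c + 1, some a, m)
    | (c, some f, m) => (c + 1, some f, m || (a != f))

def get_sp_allele_alt (ids : List String) (var2 : List (String × List String)) : String :=
  let st : Int × Option String × Bool := ids.foldl (fun st id =>
    match (PySem.Dict.mk var2).get? id with
    | some v => v.foldl altStep st
    | none => st) (0, none, false)
  if st.1 ≥ 2 ∧ st.2.2 = false then st.2.1.getD "N" else "N"

-- ===== PRECONDITION & SPEC =====
def Spec_get_sp_allele (ids : List String) (var2 : List (String × List String)) (out : String) : Prop := out = get_sp_allele_alt ids var2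
instance (ids : List String) (var2 : List (String × List String)) (out : String) : Decidable (Spec_get_sp_allele ids var2 out) := by unfold Spec_get_sp_allele; infer_instance

-- ===== CLAIM (what is proved, stated in full; the proofs are below) =====
def Claim_equal_get_sp_allele : Prop := ∀ (ids : List String) (var2 : List (String × List String)), Dom_get_sp_allele ids var2 → Spec_get_sp_allele ids var2 (get_sp_allele ids var2)

-- ===== LEMMAS AND PROOFS =====

-- the alleles contributed by one id
def pvGather (var2 : List (String × List String)) (id : String) : List String :=
  match (PySem.Dict.mk var2).get? id with
  | some v => v
  | none => []

theorem pvA_fold (var2 : List (String × List String)) :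
    ∀ (ids : List String) (acc : List String),
      ids.foldl (fun acc id =>
        match (PySem.Dict.mk var2).get? id with
        | some v => acc ++ v
        | none => acc) acc = acc ++ ids.flatMap (pvGather var2) := by
  intro ids
  induction ids with
  | nil => simp
  | cons i t ih =>
      intro acc
      simp only [List.foldl_cons, List.flatMap_cons]
      cases hv : (PySem.Dict.mk var2).get? i with
      | none => rw [ih]; simp [pvGather, hv]
      | some v => rw [ih]; simp [pvGather, hv]

theorem pvB_fold (var2 : List (String × List String)) :
    ∀ (ids : List String) (st : Int × Option String × Bool),
      ids.foldl (fun st id =>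
        match (PySem.Dict.mk var2).get? id with
        | some v => v.foldl altStep st
        | none => st) st = (ids.flatMap (pvGather var2)).foldl altStep st := by
  intro ids
  induction ids with
  | nil => simp
  | cons i t ih =>
      intro st
      simp only [List.foldl_cons, List.flatMap_cons, List.foldl_append]
      cases hv : (PySem.Dict.mk var2).get? i with
      | none => rw [ih]; simp [pvGather, hv]
      | some v => rw [ih]; simp [pvGather, hv]

-- altStep skips 'N', so folding over a list equals folding over its non-'N' filter
theorem pvB_filter :
    ∀ (L : List String) (st : Int × Option String × Bool),
      L.foldl altStep st = (L.filter (fun a => a != "N")).foldl altStep st := by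
  intro L
  induction L with
  | nil => intro st; rfl
  | cons a t ih =>
      intro st
      by_cases ha : a = "N"
      · subst ha; simp [altStep, ih]
      · have : (a != "N") = true := by simp [ha]
        simp [this, ih]

theorem pvB_run :
    ∀ (t : List String) (c : Int) (h : String) (m : Bool),
      (∀ a ∈ t, a ≠ "N") →
      t.foldl altStep (c, some h, m) = (c + t.length, some h, m || t.any (fun a => a != h)) := by
  intro t
  induction t with
  | nil => intro c h m _; simp
  | cons a t ih =>
      intro c h m hN
      have ha : a ≠ "N" := hN a (List.mem_cons_self ..)
      have step : altStep (c, some h, m) a = (c + 1, some h, m || (a != h)) := by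
        simp [altStep, ha]
      have hrest : ∀ x ∈ t, x ≠ "N" := fun x hx => hN x (List.mem_cons_of_mem _ hx)
      rw [List.foldl_cons, step, ih _ _ _ hrest]
      refine Prod.ext ?_ (Prod.ext rfl ?_)
      · simp; ring
      · simp [Bool.or_assoc]

-- set(h::t) has one element iff every element of t equals h
theorem pvSet_all_eq (h : String) :
    ∀ (t : List String), (∀ a ∈ t, a = h) → t.foldl PySem.Set.add [h] = [h] := by
  intro t
  induction t with
  | nil => intro _; rfl
  | cons a t ih =>
      intro hall
      have ha : a = h := hall a (List.mem_cons_self ..)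
      subst ha
      have : PySem.Set.add [a] a = [a] := by
        simp [PySem.Set.add, PySem.Set.contains]
      rw [List.foldl_cons, this]
      exact ih (fun x hx => hall x (List.mem_cons_of_mem _ hx))

theorem pvSet_card (h : String) (t : List String) :
    ((PySem.Set.ofList (h :: t)).length > 1) ↔ (t.any (fun a => a != h)) = true := by
  constructor
  · intro hgt
    by_contra hany
    have hall : ∀ a ∈ t, a = h := by
      intro a ha
      by_contra hne
      exact hany (List.any_eq_true.mpr ⟨a, ha, by simp [hne]⟩)
    have : PySem.Set.ofList (h :: t) = [h] := by
      rw [PySem.Set.ofList_eq_foldl]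
      have : PySem.Set.add [] h = [h] := by simp [PySem.Set.add, PySem.Set.contains]
      rw [List.foldl_cons, this]
      exact pvSet_all_eq h t hall
    rw [this] at hgt
    simp at hgt
  · intro hany
    obtain ⟨a, ha, hne⟩ := List.any_eq_true.mp hany
    have hne : a ≠ h := by simpa using hne
    have hmemh : h ∈ PySem.Set.ofList (h :: t) := by
      rw [PySem.Set.mem_ofList]; exact List.mem_cons_self ..
    have hmema : a ∈ PySem.Set.ofList (h :: t) := by
      rw [PySem.Set.mem_ofList]; exact List.mem_cons_of_mem _ ha
    match hs : PySem.Set.ofList (h :: t) with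
    | [] => rw [hs] at hmemh; simp at hmemh
    | [x] =>
        rw [hs] at hmemh hmema
        simp at hmemh hmema
        exact absurd (hmema.trans hmemh.symm) hne
    | x :: y :: rest => simp

theorem get_sp_allele_eq (ids : List String) (var2 : List (String × List String)) :
    get_sp_allele ids var2 = get_sp_allele_alt ids var2 := by
  unfold get_sp_allele get_sp_allele_alt
  rw [pvA_fold, pvB_fold, pvB_filter]
  simp only [List.nil_append]
  set L := (ids.flatMap (pvGather var2)).filter (fun a => a != "N") with hL
  have hLN : ∀ a ∈ L, a ≠ "N" := by
    intro a ha
    have := List.of_mem_filter (by exact ha)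
    simpa using this
  match hLc : L with
  | [] => simp
  | [h] =>
      have hN : h ≠ "N" := hLN h (List.mem_cons_self ..)
      have step : altStep (0, none, false) h = (1, some h, false) := by simp [altStep, hN]
      simp [step]
  | h :: b :: t =>
      have hN : h ≠ "N" := hLN h (List.mem_cons_self ..)
      have hrest : ∀ a ∈ b :: t, a ≠ "N" := fun a ha => hLN a (List.mem_cons_of_mem _ ha)
      have step : altStep (0, none, false) h = (1, some h, false) := by simp [altStep, hN]
      rw [List.foldl_cons, step, pvB_run _ _ _ _ hrest]
      have hlen : ¬ ((h :: b :: t).length < 2) := by simp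
      by_cases hany : ((b :: t).any (fun a => a != h)) = true
      · have hset : ((PySem.Set.ofList (h :: b :: t)).length > 1) := (pvSet_card h (b :: t)).mpr hany
        simp [hset, hany]
      · have hset : ¬ ((PySem.Set.ofList (h :: b :: t)).length > 1) := by
          intro hc; exact hany ((pvSet_card h (b :: t)).mp hc)
        have hanyf : ((b :: t).any (fun a => a != h)) = false := by
          simpa using hany
        simp only [hlen, if_false, hset, if_false]
        simp only [hanyf]
        have h2 : (2:Int) ≤ 1 + (((b :: t).length : Int)) := by rw [List.length_cons]; push_cast; omega
        simp [PySem.List.pyGet?, PySem.List.pyIdx?]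
        split_ifs with hc1 hc2 <;> push_cast at * <;> try omega
        all_goals simp_all

-- ===== VERDICT (by name: the statement is the Claim_ definition above) =====
theorem get_sp_allele_spec : Claim_equal_get_sp_allele := by
  intro ids var2 _
  exact get_sp_allele_eq ids var2
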